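-- pv_equiv track=rewrite | github.com/AsherGlick/TurtlePoint | main.py | every_combination_between_zero_and
-- ===== SOURCE A (Python) =====
-- def every_combination_between_zero_and(value: int):
--     first = 0
--     second = 0
--     while first < value:
--         yield (first, second)
--         second += 1
--         if second == value:
--             first += 1
--             second = first
-- ===== SOURCE B (Python) =====
-- def every_combination_between_zero_and(value: int):
--     # Scan the value x value square by a single linear index, recover the cell
--     # with divmod, and keep only the upper triangle (first <= second).
--     if value <= 0:
--         return
--     for k in range(value * value):
--         first, second = divmod(k, value)
--         if first <= second:
--             yield (first, second)
-- ===== Notes on version B (the rewrite author's own statement) =====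
-- stated objective: alternative
-- what changed: Replaces the flat while-loop state machine over a mutable (first, second) counter pair by a linear scan of the value x value square: one loop over a single index k, with (first, second) recovered arithmetically via divmod(k, value) and kept only when first <= second; same pairs in the same order, no counters or reset branch.
import Mathlib
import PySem

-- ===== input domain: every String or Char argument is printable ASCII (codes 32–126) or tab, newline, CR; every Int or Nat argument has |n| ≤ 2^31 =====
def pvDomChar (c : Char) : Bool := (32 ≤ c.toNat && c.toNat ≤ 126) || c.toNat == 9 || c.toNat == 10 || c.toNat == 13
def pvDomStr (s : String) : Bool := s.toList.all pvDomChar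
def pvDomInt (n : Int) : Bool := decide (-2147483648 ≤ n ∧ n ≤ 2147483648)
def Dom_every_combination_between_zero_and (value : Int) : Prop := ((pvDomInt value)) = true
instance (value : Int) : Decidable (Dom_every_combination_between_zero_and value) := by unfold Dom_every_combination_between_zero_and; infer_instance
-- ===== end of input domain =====

-- B replaces A's flat while-loop state machine by a linear scan of the value*value
-- square, recovering each pair arithmetically by divmod and filtering to the upper
-- triangle; same pairs in the same order (objective: alternative).

-- ===== PORT A =====
-- Transliteration of A's while loop: state (first, second), yield, second += 1,
-- reset second := first+1 when second hits value.  The invariant hypotheses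
-- (first ≤ second, and second < value while the loop runs) hold at the entry
-- state (0,0) and are preserved; they are carried only for termination.
def ecLoopA (value first second : Int)
    (hfs : first ≤ second) (hsv : first < value → second < value) : List (Int × Int) :=
  if h : first < value then
    have hv : second < value := hsv h
    (first, second) ::
      (if heq : second + 1 = value then
        ecLoopA value (first + 1) (first + 1) le_rfl (fun h' => h')
      else
        ecLoopA value first (second + 1) (by omega) (fun _ => by omega))
  else []
termination_by ((value - first).toNat, (value - second).toNat)
decreasing_by
  · exact Prod.Lex.left _ _ (by omega)
  · exact Prod.Lex.right _ (by omega)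

def every_combination_between_zero_and (value : Int) : List (Int × Int) :=
  ecLoopA value 0 0 le_rfl (fun h => h)

-- ===== PORT B =====
-- Source B: early return for value <= 0; one loop over k in range(value*value);
-- (first, second) = divmod(k, value); keep the pair when first <= second.
def every_combination_between_zero_and_alt (value : Int) : List (Int × Int) :=
  if value ≤ 0 then []
  else
    (PySem.List.pyRange 0 (value * value) 1).filterMap (fun k =>
      let first := PySem.Int.floordiv k value
      let second := PySem.Int.mod k value
      if first ≤ second then some (first, second) else none)

-- ===== PRECONDITION & SPEC =====
def Spec_every_combination_between_zero_and (value : Int) (out : List (Int × Int)) : Prop := out = every_combination_between_zero_and_alt value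
instance (value : Int) (out : List (Int × Int)) : Decidable (Spec_every_combination_between_zero_and value out) := by unfold Spec_every_combination_between_zero_and; infer_instance

-- ===== CLAIM (what is proved, stated in full; the proofs are below) =====
def Claim_equal_every_combination_between_zero_and : Prop := ∀ (value : Int), Dom_every_combination_between_zero_and value → Spec_every_combination_between_zero_and value (every_combination_between_zero_and value)

-- ===== LEMMAS AND PROOFS =====

-- From any reachable state (first, second), the rest of A's loop yields the tail
-- of row `first` starting at `second`, followed by all full rows from first+1 on.
theorem ecLoopA_eq (value first second : Int)
    (hfs : first ≤ second) (hsv : first < value → second < value) :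
    ecLoopA value first second hfs hsv =
      (PySem.List.pyRange second value 1).map (fun s => (first, s)) ++
      (PySem.List.pyRange (first + 1) value 1).flatMap (fun f =>
        (PySem.List.pyRange f value 1).map (fun s => (f, s))) := by
  fun_induction ecLoopA value first second hfs hsv with
  | case1 first second hfs hsv h hv ih2 ih1 =>
    by_cases heq : second + 1 = value
    · rw [dif_pos heq, ih2 heq]
      rw [PySem.List.pyRange_one_cons hv, show second + 1 = value from heq,
          PySem.List.pyRange_one_eq_nil le_rfl]
      by_cases h2 : first + 1 < value
      · simp [PySem.List.pyRange_one_cons h2]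
      · rw [PySem.List.pyRange_one_eq_nil (by omega : value ≤ first + 1),
            PySem.List.pyRange_one_eq_nil (by omega : value ≤ first + 1 + 1)]
        simp
    · rw [dif_neg heq, ih1 heq, PySem.List.pyRange_one_cons hv]
      simp
  | case2 first second hfs hsv h =>
    rw [PySem.List.pyRange_one_eq_nil (by omega : value ≤ second),
        PySem.List.pyRange_one_eq_nil (by omega : value ≤ first + 1)]
    simp

-- Shifting a unit-step range by a constant.
theorem pyRange_shift (c b : Int) :
    PySem.List.pyRange c (c + b) 1 = (PySem.List.pyRange 0 b 1).map (c + ·) := by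
  rw [PySem.List.pyRange_one, PySem.List.pyRange_one]
  simp only [List.map_map]
  have : (c + b) - c = b - 0 := by ring
  rw [this]
  apply List.map_congr_left
  intro k _
  simp [Function.comp]

-- The square range [0, n*v) splits into n consecutive blocks of width v.
theorem blockSplit (n : Nat) (v : Int) (hv : 0 ≤ v) :
    PySem.List.pyRange 0 ((n : Int) * v) 1 =
      (PySem.List.pyRange 0 (n : Int) 1).flatMap
        (fun f => PySem.List.pyRange (f * v) (f * v + v) 1) := by
  induction n with
  | zero => simp [PySem.List.pyRange_one_eq_nil]
  | succ n ih =>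
    have h1 : ((n + 1 : Nat) : Int) * v = (n : Int) * v + v := by push_cast; ring
    have h2 : ((n + 1 : Nat) : Int) = (n : Int) + 1 := by push_cast; ring
    rw [h1, h2,
        PySem.List.pyRange_one_append 0 ((n : Int) * v) ((n : Int) * v + v)
          (by positivity) (by omega),
        PySem.List.pyRange_one_succ_right (by positivity : (0 : Int) ≤ (n : Int)),
        List.flatMap_append, ih]
    simp

-- filterMap is nil on a list where the function is everywhere none.
theorem filterMap_all_none {α β : Type} (g : α → Option β) (l : List α)
    (h : ∀ x ∈ l, g x = none) : l.filterMap g = [] := by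
  induction l with
  | nil => rfl
  | cons a l ih =>
    rw [List.filterMap_cons, h a (by simp)]
    exact ih (fun x hx => h x (by simp [hx]))

-- filterMap is map on a list where the function is everywhere some.
theorem filterMap_all_some {α β : Type} (g : α → Option β) (m : α → β) (l : List α)
    (h : ∀ x ∈ l, g x = some (m x)) : l.filterMap g = l.map m := by
  induction l with
  | nil => rfl
  | cons a l ih =>
    rw [List.filterMap_cons, h a (by simp), List.map_cons]
    exact congrArg _ (ih (fun x hx => h x (by simp [hx])))

-- One block of width v, filtered, is exactly row f of the triangle.
theorem blockContent (v f : Int) (hv : 0 < v) (hf0 : 0 ≤ f) (hfv : f < v) :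
    (PySem.List.pyRange (f * v) (f * v + v) 1).filterMap (fun k =>
      let first := PySem.Int.floordiv k v
      let second := PySem.Int.mod k v
      if first ≤ second then some (first, second) else none) =
    (PySem.List.pyRange f v 1).map (fun s => (f, s)) := by
  rw [pyRange_shift, List.filterMap_map]
  have hdiv : ∀ s : Int, 0 ≤ s → s < v → PySem.Int.floordiv (f * v + s) v = f := by
    intro s h0 h1
    rw [PySem.Int.floordiv_eq_ediv_of_pos hv,
        show f * v + s = s + f * v by ring,
        Int.add_mul_ediv_right _ _ (by omega : v ≠ 0),
        Int.ediv_eq_zero_of_lt h0 h1]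
    ring
  have hmod : ∀ s : Int, 0 ≤ s → s < v → PySem.Int.mod (f * v + s) v = s := by
    intro s h0 h1
    rw [PySem.Int.mod_eq_emod_of_pos hv,
        show f * v + s = s + f * v by ring,
        Int.add_mul_emod_self_right, Int.emod_eq_of_lt h0 h1]
  rw [PySem.List.pyRange_one_append 0 f v hf0 (le_of_lt hfv), List.filterMap_append]
  rw [filterMap_all_none _ (PySem.List.pyRange 0 f 1) (by
    intro s hs
    rw [PySem.List.mem_pyRange_one] at hs
    simp only [Function.comp]
    rw [hdiv s hs.1 (by omega), hmod s hs.1 (by omega)]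
    simp only [if_neg (by omega : ¬ f ≤ s)])]
  rw [filterMap_all_some _ (fun s => (f, s)) (PySem.List.pyRange f v 1) (by
    intro s hs
    rw [PySem.List.mem_pyRange_one] at hs
    simp only [Function.comp]
    rw [hdiv s (by omega) hs.2, hmod s (by omega) hs.2]
    simp only [if_pos hs.1])]
  simp

-- filterMap distributes over flatMap.
theorem filterMap_flatMap {α β γ : Type} (l : List α) (g : α → List β) (h : β → Option γ) :
    (l.flatMap g).filterMap h = l.flatMap (fun a => (g a).filterMap h) := by
  induction l with
  | nil => rfl
  | cons a l ih => rw [List.flatMap_cons, List.filterMap_append, ih, List.flatMap_cons]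

-- B's scan-and-filter computes the row-major triangle.
theorem alt_eq (value : Int) :
    every_combination_between_zero_and_alt value =
      (PySem.List.pyRange 0 value 1).flatMap (fun f =>
        (PySem.List.pyRange f value 1).map (fun s => (f, s))) := by
  unfold every_combination_between_zero_and_alt
  by_cases h : value ≤ 0
  · rw [if_pos h, PySem.List.pyRange_one_eq_nil h]
    simp
  · rw [if_neg h]
    have hv : ((value.toNat : Int)) = value := by omega
    rw [show value * value = (value.toNat : Int) * value by rw [hv],
        blockSplit value.toNat value (by omega), hv, filterMap_flatMap]
    apply List.flatMap_congr
    intro f hf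
    rw [PySem.List.mem_pyRange_one] at hf
    exact blockContent value f (by omega) hf.1 hf.2

-- ===== VERDICT (by name: the statement is the Claim_ definition above) =====
theorem every_combination_between_zero_and_spec : Claim_equal_every_combination_between_zero_and := by
  intro value _
  unfold Spec_every_combination_between_zero_and every_combination_between_zero_and
  rw [ecLoopA_eq, alt_eq]
  by_cases h : 0 < value
  · simp [PySem.List.pyRange_one_cons h]
  · rw [PySem.List.pyRange_one_eq_nil (by omega : value ≤ 0),
        PySem.List.pyRange_one_eq_nil (by omega : value ≤ 0 + 1)]
    simp
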